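-- pv_equiv track=rewrite | github.com/aik38/tatemono-map | src/tatemono_map/normalize/building_summaries.py | _pick_age_years
-- ===== SOURCE A (Python) =====
-- from collections import Counter
--
-- def _median_int(values: list[int]) -> int:
--     ordered = sorted(values)
--     mid = len(ordered) // 2
--     if len(ordered) % 2 == 1:
--         return ordered[mid]
--     return int((ordered[mid - 1] + ordered[mid]) / 2)
--
-- def _pick_age_years(values: list[int]) -> int | None:
--     if not values:
--         return None
--     counts = Counter(values)
--     max_count = max(counts.values())
--     modes = sorted(value for value, count in counts.items() if count == max_count)
--     if len(modes) == 1: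
--         return modes[0]
--     return _median_int(values)
-- ===== SOURCE B (Python) =====
-- def _pick_age_years(values: list[int]) -> int | None:
--     if not values:
--         return None
--     s = sorted(values)
--     n = len(s)
--     best = 0       # longest run length seen so far
--     ties = 0       # how many runs have length == best
--     mode = None    # value of the first run reaching the current best
--     i = 0
--     while i < n:
--         j = i
--         while j < n and s[j] == s[i]:
--             j += 1
--         run = j - i
--         if run > best:
--             best, ties, mode = run, 1, s[i]
--         elif run == best:
--             ties += 1
--         i = j
--     if ties == 1:
--         return mode
--     mid = n // 2
--     if n % 2 == 1:
--         return s[mid]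
--     return int((s[mid - 1] + s[mid]) / 2)
-- ===== Notes on version B (the rewrite author's own statement) =====
-- stated objective: alternative
-- what changed: Replaces the Counter/max/sorted-modes pipeline (hash counting, a max over the counts, a second sort for the modes and a third sort for the median) by a single sort followed by one linear run-length scan of the sorted list that tracks the longest run, how many runs attain it, and its value; the median reuses the already-sorted list; it trades the hash counter for the run scan at the same O(n log n) cost.
import Mathlib
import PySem

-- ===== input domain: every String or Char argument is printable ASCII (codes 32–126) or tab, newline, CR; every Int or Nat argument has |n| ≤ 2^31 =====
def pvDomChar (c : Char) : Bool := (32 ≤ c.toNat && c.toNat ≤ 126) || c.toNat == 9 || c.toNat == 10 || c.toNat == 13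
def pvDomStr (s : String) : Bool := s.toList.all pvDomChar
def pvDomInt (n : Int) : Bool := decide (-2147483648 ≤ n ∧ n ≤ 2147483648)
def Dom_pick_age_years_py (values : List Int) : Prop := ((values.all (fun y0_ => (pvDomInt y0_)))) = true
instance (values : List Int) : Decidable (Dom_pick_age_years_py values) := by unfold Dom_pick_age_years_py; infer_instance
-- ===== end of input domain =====

-- B replaces A's Counter/max/modes pipeline by one sort plus a single run-length scan of
-- the sorted list that finds the longest run, its multiplicity and its value (objective: alternative).

-- ===== PORT A =====
-- Python's int((a+b)/2) is PySem.Int.truncdiv (a+b) 2, exact for |a+b| < 2^53 (Dom gives |a|,|b| ≤ 2^31).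
def median_int_py (values : List Int) : Option Int :=
  let ordered := PySem.List.sorted values (fun x => x)
  let mid := ordered.length / 2
  if ordered.length % 2 = 1 then PySem.List.pyGet? ordered (mid : Int)
  else
    match PySem.List.pyGet? ordered ((mid : Int) - 1), PySem.List.pyGet? ordered (mid : Int) with
    | some a, some b => some (PySem.Int.truncdiv (a + b) 2)
    | _, _ => none

def pick_age_years_py (values : List Int) : Option Int :=
  if values = [] then none
  else
    let counts := PySem.Dict.counter values
    match PySem.List.max? counts.values (fun x => x) with
    | none => none  -- unreachable: values ≠ [] makes counts nonempty (Python's max raises only on empty)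
    | some max_count =>
      let modes := PySem.List.sorted
        ((counts.items.filter (fun p => p.2 == max_count)).map (fun p => p.1)) (fun x => x)
      if modes.length = 1 then PySem.List.pyGet? modes 0
      else median_int_py values

-- ===== PORT B =====
-- the outer while loop of Source B; each step consumes one run of equal elements
def pickScan : List Int → Nat → Nat → Option Int → Nat × Nat × Option Int
  | [], best, ties, mode => (best, ties, mode)
  | x :: rest, best, ties, mode =>
    let run := 1 + (rest.takeWhile (fun y => y == x)).length
    let rest' := rest.dropWhile (fun y => y == x)
    if best < run then pickScan rest' run 1 (some x)
    else if run = best then pickScan rest' best (ties + 1) mode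
    else pickScan rest' best ties mode
termination_by s _ _ _ => s.length
decreasing_by
  all_goals simp only [List.length_cons]
  all_goals exact Nat.lt_succ_of_le (List.length_dropWhile_le _ _)

def pick_age_years_py_alt (values : List Int) : Option Int :=
  if values = [] then none
  else
    let s := PySem.List.sorted values (fun x => x)
    let r := pickScan s 0 0 none
    if r.2.1 = 1 then r.2.2
    else
      let mid := s.length / 2
      if s.length % 2 = 1 then PySem.List.pyGet? s (mid : Int)
      else
        match PySem.List.pyGet? s ((mid : Int) - 1), PySem.List.pyGet? s (mid : Int) with
        | some a, some b => some (PySem.Int.truncdiv (a + b) 2)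
        | _, _ => none

-- ===== PRECONDITION & SPEC =====
def Spec_pick_age_years_py (values : List Int) (out : Option Int) : Prop := out = pick_age_years_py_alt values
instance (values : List Int) (out : Option Int) : Decidable (Spec_pick_age_years_py values out) := by unfold Spec_pick_age_years_py; infer_instance

-- ===== CLAIM (what is proved, stated in full; the proofs are below) =====
def Claim_equal_pick_age_years_py : Prop := ∀ (values : List Int), Dom_pick_age_years_py values → Spec_pick_age_years_py values (pick_age_years_py values)

-- ===== LEMMAS AND PROOFS =====

-- the run decomposition of Source B's scan: (value, run length) per maximal run
def runsOf : List Int → List (Int × Nat)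
  | [] => []
  | x :: rest =>
    (x, 1 + (rest.takeWhile (fun y => y == x)).length) :: runsOf (rest.dropWhile (fun y => y == x))
termination_by s => s.length
decreasing_by
  simp only [List.length_cons]
  exact Nat.lt_succ_of_le (List.length_dropWhile_le _ _)

-- Source B's scan abstracted to the run list
def scanPairs : List (Int × Nat) → Nat → Nat → Option Int → Nat × Nat × Option Int
  | [], b, t, m => (b, t, m)
  | (v, c) :: ps, b, t, m =>
    if b < c then scanPairs ps c 1 (some v)
    else if c = b then scanPairs ps b (t + 1) m
    else scanPairs ps b t m

def maxC (ps : List (Int × Nat)) : Nat := (ps.map (fun p => p.2)).foldr max 0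

lemma pickScan_eq_scanPairs (s : List Int) :
    ∀ b t m, pickScan s b t m = scanPairs (runsOf s) b t m := by
  induction s using runsOf.induct with
  | case1 => intro b t m; rw [pickScan, runsOf]; rfl
  | case2 x rest ih =>
    intro b t m
    rw [pickScan, runsOf]
    simp only [scanPairs]
    split_ifs <;> apply ih

lemma le_maxC {ps : List (Int × Nat)} {p : Int × Nat} (h : p ∈ ps) : p.2 ≤ maxC ps := by
  induction ps with
  | nil => cases h
  | cons q ps ih =>
    simp only [maxC, List.map_cons, List.foldr_cons] at *
    rcases List.mem_cons.1 h with rfl | h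
    · exact Nat.le_max_left _ _
    · exact le_trans (ih h) (Nat.le_max_right _ _)

lemma maxC_mem {ps : List (Int × Nat)} (h : ps ≠ []) : ∃ p ∈ ps, p.2 = maxC ps := by
  induction ps with
  | nil => exact absurd rfl h
  | cons q ps ih =>
    by_cases hn : ps = []
    · subst hn; exact ⟨q, List.mem_cons_self, by simp [maxC]⟩
    · rcases ih hn with ⟨p, hp, hpe⟩
      simp only [maxC, List.map_cons, List.foldr_cons]
      by_cases hq : maxC ps ≤ q.2
      · exact ⟨q, List.mem_cons_self, (Nat.max_eq_left (by simpa [maxC] using hq)).symm⟩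
      · refine ⟨p, List.mem_cons_of_mem _ hp, ?_⟩
        rw [hpe]; exact (Nat.max_eq_right (Nat.le_of_not_le hq)).symm

lemma scanPairs_spec (ps : List (Int × Nat)) : ∀ b t m,
    scanPairs ps b t m =
      if ∀ p ∈ ps, p.2 ≤ b then (b, t + (ps.filter (fun p => p.2 = b)).length, m)
      else (maxC ps, (ps.filter (fun p => p.2 = maxC ps)).length,
            ((ps.filter (fun p => p.2 = maxC ps)).head?).map (fun p => p.1)) := by
  induction ps with
  | nil => intro b t m; simp [scanPairs]
  | cons q ps ih =>
    obtain ⟨v, c⟩ := q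
    intro b t m
    have hmaxcons : maxC ((v, c) :: ps) = max c (maxC ps) := by simp [maxC]
    rw [scanPairs]
    by_cases h1 : b < c
    · rw [if_pos h1, ih]
      have hnall : ¬ ∀ p ∈ (v, c) :: ps, p.2 ≤ b := by
        intro hall; exact absurd (hall (v, c) List.mem_cons_self) (by omega)
      rw [if_neg hnall]
      by_cases h2 : ∀ p ∈ ps, p.2 ≤ c
      · rw [if_pos h2]
        have hM : maxC ((v, c) :: ps) = c := by
          rw [hmaxcons]
          refine Nat.max_eq_left ?_
          rcases eq_or_ne ps [] with rfl | hne
          · exact Nat.zero_le c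
          · obtain ⟨p, hp, hpe⟩ := maxC_mem hne
            rw [← hpe]; exact h2 p hp
        rw [hM, List.filter_cons]
        simp only [decide_eq_true_eq, if_true, List.length_cons,
          List.head?_cons, Option.map_some]
        refine Prod.ext rfl (Prod.ext ?_ rfl)
        simp only []
        omega
      · rw [if_neg h2]
        have hMps : c < maxC ps := by
          rcases not_forall.1 h2 with ⟨p, hp⟩
          rcases Classical.not_imp.1 hp with ⟨hpm, hpc⟩
          exact lt_of_lt_of_le (by omega) (le_maxC hpm)
        have hM : maxC ((v, c) :: ps) = maxC ps := by
          rw [hmaxcons]; exact Nat.max_eq_right (Nat.le_of_lt hMps)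
        rw [hM, List.filter_cons]
        simp only [decide_eq_true_eq]
        rw [if_neg (Nat.ne_of_lt hMps)]
    · -- c ≤ b
      have hcb : c ≤ b := by omega
      have hMle : ∀ (hall : ∀ p ∈ ps, p.2 ≤ b) , ∀ p ∈ (v, c) :: ps, p.2 ≤ b := by
        intro hall p hp
        rcases List.mem_cons.1 hp with rfl | hp
        · exact hcb
        · exact hall p hp
      have hfc : ∀ M, c ≠ M → List.filter (fun p => decide (p.2 = M)) ((v, c) :: ps) = List.filter (fun p => decide (p.2 = M)) ps := by
        intro M hne
        rw [List.filter_cons]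
        simp only [decide_eq_true_eq]
        rw [if_neg hne]
      have hMgt : (¬ ∀ p ∈ ps, p.2 ≤ b) → c < maxC ps ∧ maxC ((v, c) :: ps) = maxC ps := by
        intro h2
        rcases not_forall.1 h2 with ⟨p, hp⟩
        rcases Classical.not_imp.1 hp with ⟨hpm, hpc⟩
        have : c < maxC ps := lt_of_lt_of_le (by omega) (le_maxC hpm)
        exact ⟨this, by rw [hmaxcons]; exact Nat.max_eq_right (Nat.le_of_lt this)⟩
      rw [if_neg h1]
      by_cases h3 : c = b
      · rw [if_pos h3, ih]
        by_cases h2 : ∀ p ∈ ps, p.2 ≤ b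
        · rw [if_pos h2, if_pos (hMle h2), List.filter_cons]
          simp only [decide_eq_true_eq]
          rw [if_pos h3]
          simp only [List.length_cons]
          refine Prod.ext rfl (Prod.ext ?_ rfl)
          simp only []
          omega
        · rw [if_neg h2, if_neg (fun hall => h2 (fun p hp => hall p (List.mem_cons_of_mem _ hp)))]
          obtain ⟨hlt, hM⟩ := hMgt h2
          rw [hM, hfc _ (Nat.ne_of_lt hlt)]
      · rw [if_neg h3, ih]
        by_cases h2 : ∀ p ∈ ps, p.2 ≤ b
        · rw [if_pos h2, if_pos (hMle h2), hfc b h3]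
        · rw [if_neg h2, if_neg (fun hall => h2 (fun p hp => hall p (List.mem_cons_of_mem _ hp)))]
          obtain ⟨hlt, hM⟩ := hMgt h2
          rw [hM, hfc _ (Nat.ne_of_lt hlt)]

lemma dropWhile_gt {x : Int} {rest : List Int} (hs : (x :: rest).Pairwise (· ≤ ·)) :
    ∀ y ∈ rest.dropWhile (fun y => y == x), x < y := by
  intro y hy
  have hsub : (rest.dropWhile (fun y => y == x)).Sublist rest := List.dropWhile_sublist _
  have hxle : x ≤ y := (List.pairwise_cons.1 hs).1 y (hsub.mem hy)
  rcases hd : rest.dropWhile (fun y => y == x) with _ | ⟨z, d'⟩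
  · simp [hd] at hy
  · have hz : (z == x) = false := by
      have h := List.head?_dropWhile_not (p := fun y => y == x) (l := rest)
      rw [hd] at h
      simpa using h
    have hzx : x < z := by
      have hle : x ≤ z := (List.pairwise_cons.1 hs).1 z (hsub.mem (by simp [hd]))
      rcases lt_or_eq_of_le hle with h | h
      · exact h
      · subst h; simp at hz
    rw [hd] at hy
    rcases List.mem_cons.1 hy with rfl | hy'
    · exact hzx
    · have hsd : (z :: d').Pairwise (· ≤ ·) :=
        (List.pairwise_cons.1 hs).2.sublist (hd ▸ hsub)
      exact lt_of_lt_of_le hzx ((List.pairwise_cons.1 hsd).1 y hy')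

lemma runsOf_spec : ∀ s : List Int, s.Pairwise (· ≤ ·) →
    (∀ p ∈ runsOf s, p.2 = s.count p.1) ∧
    ((runsOf s).map (fun p => p.1)).Pairwise (· < ·) ∧
    (∀ v, v ∈ (runsOf s).map (fun p => p.1) ↔ v ∈ s) := by
  intro s
  induction s using runsOf.induct with
  | case1 => intro _; exact ⟨by simp [runsOf], by simp [runsOf], by simp [runsOf]⟩
  | case2 x rest ih =>
    intro hs
    have hgt := dropWhile_gt hs
    have hsd : (rest.dropWhile (fun y => y == x)).Pairwise (· ≤ ·) :=
      (List.pairwise_cons.1 hs).2.sublist (List.dropWhile_sublist _)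
    obtain ⟨ihc, ihp, ihm⟩ := ih hsd
    have htw : ∀ y ∈ rest.takeWhile (fun y => y == x), y = x := by
      intro y hy
      simpa using List.mem_takeWhile_imp hy
    have hsplit : rest = rest.takeWhile (fun y => y == x) ++ rest.dropWhile (fun y => y == x) :=
      (List.takeWhile_append_dropWhile).symm
    have hxd : x ∉ rest.dropWhile (fun y => y == x) := fun hx => absurd (hgt x hx) (lt_irrefl x)
    have hmemd : ∀ v, v ∈ (runsOf (rest.dropWhile (fun y => y == x))).map (fun p => p.1) → x < v := by
      intro v hv
      exact hgt v ((ihm v).1 hv)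
    rw [runsOf]
    refine ⟨?_, ?_, ?_⟩
    · intro p hp
      rcases List.mem_cons.1 hp with rfl | hp'
      · -- the head run
        simp only [List.count_cons_self]
        have h1 : (rest.takeWhile (fun y => y == x)).count x = (rest.takeWhile (fun y => y == x)).length :=
          List.count_eq_length.2 (fun y hy => ((htw y hy).symm ▸ rfl))
        have h2 : (rest.dropWhile (fun y => y == x)).count x = 0 := List.count_eq_zero.2 hxd
        have hcr : rest.count x = (rest.takeWhile (fun y => y == x)).length := by
          conv_lhs => rw [hsplit]
          rw [List.count_append]
          omega
        omega
      · rw [ihc p hp']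
        have hpx : x < p.1 := hmemd p.1 (List.mem_map.2 ⟨p, hp', rfl⟩)
        have hne : p.1 ≠ x := fun h => absurd (h ▸ hpx) (lt_irrefl x)
        have h1 : (rest.takeWhile (fun y => y == x)).count p.1 = 0 :=
          List.count_eq_zero.2 (fun hc => hne (htw _ hc))
        have hcr : rest.count p.1 = (rest.dropWhile (fun y => y == x)).count p.1 := by
          conv_lhs => rw [hsplit]
          rw [List.count_append]
          omega
        rw [List.count_cons_of_ne (Ne.symm hne), hcr]
    · simp only [List.map_cons]
      exact List.pairwise_cons.2 ⟨hmemd, ihp⟩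
    · intro v
      simp only [List.map_cons, List.mem_cons, ihm v]
      constructor
      · rintro (rfl | hv)
        · exact Or.inl rfl
        · refine Or.inr ?_
          rw [hsplit]
          exact List.mem_append_right _ hv
      · rintro (rfl | hv')
        · exact Or.inl rfl
        · rw [hsplit] at hv'
          rcases List.mem_append.1 hv' with h | h
          · exact Or.inl (htw _ h)
          · exact Or.inr h

lemma main_eq (values : List Int) (hv : values ≠ []) :
    pick_age_years_py values = pick_age_years_py_alt values := by
  set s := PySem.List.sorted values (fun x => x) with hs_def
  have hperm : s.Perm values := PySem.List.sorted_perm values (fun x => x) false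
  have hpair : s.Pairwise (· ≤ ·) := PySem.List.sorted_pairwise values (fun x => x)
  have hsne : s ≠ [] := fun h => hv ((PySem.List.sorted_eq_nil_iff _ _ _).1 h)
  obtain ⟨hc, hpw, hmem⟩ := runsOf_spec s hpair
  set runs := runsOf s with hruns_def
  set keys := runs.map (fun p => p.1) with hkeys_def
  have hrne : runs ≠ [] := by
    rcases hsd : s with _ | ⟨y, t⟩
    · exact absurd hsd hsne
    · rw [hruns_def, hsd, runsOf]; simp
  have hcnt : ∀ v : Int, s.count v = values.count v := fun v => hperm.count_eq v
  have hpos : ∀ p ∈ runs, 1 ≤ p.2 := by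
    intro p hp
    rw [hc p hp]
    exact List.count_pos_iff.2 ((hmem p.1).1 (List.mem_map.2 ⟨p, hp, rfl⟩))
  set M := maxC runs with hM_def
  set Fr := runs.filter (fun p => p.2 = M) with hFr_def
  -- B's scan result
  have hscan : pickScan s 0 0 none = (M, Fr.length, (Fr.head?).map (fun p => p.1)) := by
    rw [pickScan_eq_scanPairs, scanPairs_spec, if_neg]
    intro hall
    obtain ⟨p, hp⟩ := List.exists_mem_of_ne_nil runs hrne
    exact absurd (hall p hp) (by have := hpos p hp; omega)
  -- A's counter values list
  set D := (PySem.Set.ofList values : List Int) with hD_def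
  have hvals : (PySem.Dict.counter values).values
      = D.map (fun k => ((values.count k : Int))) := by
    simp only [PySem.Dict.values, PySem.Dict.items_counter, List.map_map]
    rfl
  have hDne : D ≠ [] := by
    obtain ⟨a, ha⟩ := List.exists_mem_of_ne_nil values hv
    intro h
    rw [hD_def] at h
    exact absurd ((PySem.Set.mem_ofList values a).2 ha) (by rw [h]; simp)
  obtain ⟨m, hm_eq⟩ : ∃ m, PySem.List.max? ((PySem.Dict.counter values).values) (fun x => x) = some m := by
    rcases h : PySem.List.max? ((PySem.Dict.counter values).values) (fun x => x) with _ | m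
    · rw [PySem.List.max?_eq_none_iff, hvals] at h
      exact absurd (List.map_eq_nil_iff.1 h) hDne
    · exact ⟨m, rfl⟩
  have hub : ∀ y ∈ D.map (fun k => ((values.count k : Int))), y ≤ m := by
    have := PySem.List.max?_isMax (hvals ▸ hm_eq)
    simpa using this
  have hmm : m ∈ D.map (fun k => ((values.count k : Int))) := PySem.List.max?_mem (hvals ▸ hm_eq)
  -- m = M
  have hkeysD : ∀ v : Int, v ∈ D ↔ v ∈ keys := by
    intro v
    rw [hD_def, PySem.Set.mem_ofList, ← hperm.mem_iff]
    exact (hmem v).symm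
  have hMm : m = (M : Int) := by
    apply le_antisymm
    · obtain ⟨k, hkD, hkm⟩ := List.mem_map.1 hmm
      obtain ⟨p, hp, hpk⟩ := List.mem_map.1 ((hkeysD k).1 hkD)
      have : p.2 = values.count k := by rw [hc p hp, hpk, hcnt]
      rw [← hkm, ← this]
      exact_mod_cast le_maxC hp
    · obtain ⟨p, hp, hpe⟩ := maxC_mem hrne
      have h1 : p.1 ∈ D := (hkeysD p.1).2 (List.mem_map.2 ⟨p, hp, rfl⟩)
      have h2 : ((values.count p.1 : Int)) ≤ m := hub _ (List.mem_map.2 ⟨p.1, h1, rfl⟩)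
      rw [← hcnt, ← hc p hp, hpe] at h2
      exact h2
  -- the mode filters
  set P : Int → Bool := fun k => decide (values.count k = M) with hP_def
  have hfiltc : runs.filter (fun p => p.2 = M) = runs.filter (fun p => P p.1) := by
    refine List.filter_congr ?_
    intro p hp
    simp [hP_def, hc p hp, hcnt]
  have hFr_map : Fr.map (fun p => p.1) = keys.filter P := by
    rw [hFr_def, hfiltc, hkeys_def, List.filter_map]
    rfl
  have hkeys_nodup : keys.Nodup := hpw.imp (fun h => ne_of_lt h)
  have hD_nodup : D.Nodup := PySem.Set.nodup_ofList values
  have hDperm : D.Perm keys := (List.perm_ext_iff_of_nodup hD_nodup hkeys_nodup).2 hkeysD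
  have hfperm : (D.filter P).Perm (keys.filter P) := hDperm.filter P
  -- A's modes list
  have hmodes : ((PySem.Dict.counter values).items.filter (fun p => p.2 == m)).map (fun p => p.1)
      = D.filter P := by
    rw [PySem.Dict.items_counter, List.filter_map, List.map_map]
    have h1 : (fun p : Int × Int => p.2 == m) ∘ (fun k => (k, (values.count k : Int))) = P := by
      funext k
      simp only [Function.comp, hP_def, hMm]
      by_cases h : List.count k values = M
      · simp [h]
      · simp [beq_eq_false_iff_ne, h]
    rw [h1]
    have h2 : ((fun p : Int × Int => p.1) ∘ fun k => (k, (values.count k : Int))) = id := rfl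
    rw [h2, List.map_id]
  -- lengths agree
  have hlen : (PySem.List.sorted (((PySem.Dict.counter values).items.filter (fun p => p.2 == m)).map (fun p => p.1)) (fun x => x)).length = Fr.length := by
    rw [PySem.List.length_sorted, hmodes, hfperm.length_eq, ← hFr_map, List.length_map]
  -- unfold both programs
  rw [pick_age_years_py, pick_age_years_py_alt, if_neg hv, if_neg hv]
  simp only [← hs_def, hscan, hm_eq]
  by_cases hL : Fr.length = 1
  · rw [hL] at hlen
    rw [if_pos hlen, if_pos hL]
    -- both return the unique mode
    have h1 : (keys.filter P).length = 1 := by rw [← hFr_map, List.length_map, hL]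
    obtain ⟨k0, hk0⟩ := List.length_eq_one_iff.1 h1
    have hDf : D.filter P = [k0] := List.perm_singleton.1 (hk0 ▸ hfperm)
    have hsorted1 : PySem.List.sorted (((PySem.Dict.counter values).items.filter (fun p => p.2 == m)).map (fun p => p.1)) (fun x => x) = [k0] := by
      refine PySem.List.sorted_eq_of_perm_of_pairwise_lt _ _ _ ?_ (List.pairwise_singleton _ _)
      rw [hmodes, hDf]
    rw [hsorted1]
    have hhead : (Fr.head?).map (fun p => p.1) = some k0 := by
      rw [← List.head?_map, hFr_map, hk0]
      rfl
    rw [hhead]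
    rfl
  · rw [if_neg (by rw [hlen]; exact hL), if_neg hL]
    rw [median_int_py]

-- ===== VERDICT (by name: the statement is the Claim_ definition above) =====
theorem pick_age_years_py_spec : Claim_equal_pick_age_years_py := by
  intro values _
  unfold Spec_pick_age_years_py
  by_cases hv : values = []
  · subst hv; rfl
  · exact main_eq values hv
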